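-- pv_equiv track=rewrite | github.com/ericsryan/techdegree_project_2 | secret_messages.py | five_keyword
-- ===== SOURCE A (Python) =====
-- import string
--
-- def five_keyword(message):
--     """Reformat the characters of a message into blocks of five."""
--     message = message.upper()
--     block_message = []
--     counter = 0
--     for character in message:
--         if character in string.ascii_uppercase + string.digits:
--             block_message.append(character)
--             counter += 1
--             if counter == 5:
--                 block_message.append(' ')
--                 counter = 0
--     block_message.append('-' * (5 - (len(block_message) % 6)))
--     return ''.join(block_message)
-- ===== SOURCE B (Python) =====
-- import string
--
-- ALNUM = set(string.ascii_uppercase + string.digits)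
--
-- def five_keyword(message):
--     """Reformat the characters of a message into blocks of five."""
--     filtered = [c for c in message.upper() if c in ALNUM]
--     blocks = [filtered[i:i + 5] for i in range(0, len(filtered), 5)]
--     out = [''.join(b) + ' ' if len(b) == 5 else ''.join(b) for b in blocks]
--     return ''.join(out) + '-' * (5 - len(filtered) % 5)
-- ===== Notes on version B (the rewrite author's own statement) =====
-- stated objective: alternative
-- what changed: Replaces A's single loop with a running counter and mutable block list by a filter pass, index-based chunking via slices filtered[i:i+5] over range(0, n, 5), and a closed-form dash count 5 - len(filtered) % 5 instead of A's 5 - len(block_message) % 6.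
import Mathlib
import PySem

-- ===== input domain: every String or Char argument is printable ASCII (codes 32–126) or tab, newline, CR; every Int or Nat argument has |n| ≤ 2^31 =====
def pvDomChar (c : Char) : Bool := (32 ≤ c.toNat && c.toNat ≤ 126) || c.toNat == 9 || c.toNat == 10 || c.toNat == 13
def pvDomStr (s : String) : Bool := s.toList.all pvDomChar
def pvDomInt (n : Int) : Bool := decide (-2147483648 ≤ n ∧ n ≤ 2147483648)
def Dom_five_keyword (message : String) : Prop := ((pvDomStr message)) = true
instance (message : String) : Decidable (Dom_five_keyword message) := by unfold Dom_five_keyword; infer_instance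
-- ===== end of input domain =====

-- B replaces A's running-counter accumulator loop by a filter pass, index-based 5-chunking
-- by slicing, and a closed-form dash count 5 - len % 5 (objective: alternative decomposition).


-- string.ascii_uppercase + string.digits (module constant used by both versions)
def pvAlnum : List Char := "ABCDEFGHIJKLMNOPQRSTUVWXYZ0123456789".toList

-- ===== PORT A =====
-- one step of A's for-loop (state: block_message as a list of chars, counter)
def pvStepA (st : List Char × Nat) (character : Char) : List Char × Nat :=
  if character ∈ pvAlnum then
    let acc := st.1 ++ [character]
    let counter := st.2 + 1
    if counter = 5 then (acc ++ [' '], 0) else (acc, counter)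
  else st

def five_keyword (message : String) : String :=
  let msg := PySem.Str.upper message
  let st := msg.toList.foldl pvStepA ([], 0)
  -- '-' * (5 - len(block_message) % 6): the count 5 - len % 6 is always ≥ 0
  String.ofList (st.1 ++ List.replicate (5 - st.1.length % 6) '-')

-- ===== PORT B =====
def five_keyword_alt (message : String) : String :=
  let filtered := (PySem.Str.upper message).toList.filter (fun c => c ∈ pvAlnum)
  let blocks := (PySem.List.pyRange 0 (filtered.length : Int) 5).map
      (fun i => PySem.List.slice filtered (some i) (some (i + 5)))
  let out := (blocks.map (fun b => if b.length = 5 then b ++ [' '] else b)).flatten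
  String.ofList (out ++ List.replicate (5 - filtered.length % 5) '-')

-- ===== PRECONDITION & SPEC =====
def Spec_five_keyword (message : String) (out : String) : Prop := out = five_keyword_alt message
instance (message : String) (out : String) : Decidable (Spec_five_keyword message out) := by unfold Spec_five_keyword; infer_instance

-- ===== CLAIM (what is proved, stated in full; the proofs are below) =====
def Claim_equal_five_keyword : Prop := ∀ (message : String), Dom_five_keyword message → Spec_five_keyword message (five_keyword message)

-- ===== LEMMAS AND PROOFS =====

-- canonical form both sides are reduced to: full 5-blocks each followed by a space
def pvBlocks (chars : List Char) : List Char :=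
  if chars.length < 5 then chars
  else chars.take 5 ++ ' ' :: pvBlocks (chars.drop 5)
termination_by chars.length
decreasing_by simp; omega

theorem pvBlocks_cons5 (a b c d e : Char) (rest : List Char) :
    pvBlocks (a :: b :: c :: d :: e :: rest) = a :: b :: c :: d :: e :: ' ' :: pvBlocks rest := by
  rw [pvBlocks]; simp

-- ---- A side: the fold builds pvBlocks ----

-- A's conditional fold over the whole string = the unconditional step over the filtered list
theorem foldA_filter (l : List Char) (st : List Char × Nat) :
    l.foldl pvStepA st = (l.filter (fun c => c ∈ pvAlnum)).foldl
      (fun st c => let acc := st.1 ++ [c];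
                   let k := st.2 + 1;
                   if k = 5 then (acc ++ [' '], 0) else (acc, k)) st := by
  induction l generalizing st with
  | nil => rfl
  | cons a t ih =>
      by_cases h : a ∈ pvAlnum <;> simp [List.foldl, h, pvStepA, ih]

-- the unconditional fold from counter 0 builds exactly pvBlocks; counter ends at length % 5
theorem fold_blocks_fuel (n : Nat) : ∀ (l : List Char), l.length ≤ n → ∀ acc,
    l.foldl (fun (st : List Char × Nat) c =>
        let a := st.1 ++ [c];
        let k := st.2 + 1;
        if k = 5 then (a ++ [' '], 0) else (a, k)) (acc, 0)
      = (acc ++ pvBlocks l, l.length % 5) := by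
  induction n with
  | zero =>
      intro l hl acc
      match l, hl with
      | [], _ => simp [pvBlocks]
  | succ n ih =>
    intro l hl acc
    match l, hl with
    | [], _ => simp [pvBlocks]
    | [a], _ => simp [pvBlocks, List.foldl]
    | [a,b], _ => simp [pvBlocks, List.foldl]
    | [a,b,c], _ => simp [pvBlocks, List.foldl]
    | [a,b,c,d], _ => simp [pvBlocks, List.foldl]
    | a :: b :: c :: d :: e :: rest, hl =>
        have h5 : ∀ acc' : List Char,
            List.foldl (fun (st : List Char × Nat) c =>
              let a := st.1 ++ [c];
              let k := st.2 + 1;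
              if k = 5 then (a ++ [' '], 0) else (a, k)) (acc', 0) (a :: b :: c :: d :: e :: rest)
            = List.foldl (fun (st : List Char × Nat) c =>
              let a := st.1 ++ [c];
              let k := st.2 + 1;
              if k = 5 then (a ++ [' '], 0) else (a, k)) (acc' ++ [a,b,c,d,e,' '], 0) rest := by
          intro acc'; simp [List.foldl]
        rw [h5, ih rest (by simp only [List.length_cons] at hl; omega) _, pvBlocks_cons5]
        simp [List.append_assoc]
        omega

-- ---- B side: the chunk comprehension builds pvBlocks ----

theorem pyRange_five (n : Nat) :
    PySem.List.pyRange 0 (n : Int) 5 = (List.range ((n + 4) / 5)).map (fun k : Nat => (5 * (k : Int))) := by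
  rw [PySem.List.pyRange_of_pos 0 (n : Int) (by norm_num)]
  have hc : (if (0 : Int) < (n : Int) then (((n : Int) - 0 + 5 - 1) / 5).toNat else 0) = (n + 4) / 5 := by
    split_ifs with h <;> omega
  rw [hc]
  simp only [zero_add]

theorem slice_chunk (l : List Char) (k : Nat) :
    PySem.List.slice l (some (5 * (k : Int))) (some (5 * (k : Int) + 5)) = (l.drop (5 * k)).take 5 := by
  rw [PySem.List.slice_toNat l (by positivity) (by positivity)]
  have h1 : (5 * (k : Int)).toNat = 5 * k := by omega
  have h2 : (5 * (k : Int) + 5).toNat = 5 * k + 5 := by omega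
  rw [h1, h2]
  congr 1
  omega

theorem chunk_fuel (n : Nat) : ∀ (l : List Char), l.length ≤ n →
    ((List.range ((l.length + 4) / 5)).map (fun k =>
      if ((l.drop (5 * k)).take 5).length = 5 then (l.drop (5 * k)).take 5 ++ [' ']
      else (l.drop (5 * k)).take 5)).flatten = pvBlocks l := by
  induction n with
  | zero =>
      intro l hl
      match l, hl with
      | [], _ => simp [pvBlocks]
  | succ n ih =>
    intro l hl
    match l, hl with
    | [], _ => simp [pvBlocks]
    | [a], _ => simp [pvBlocks]
    | [a,b], _ => simp [pvBlocks]
    | [a,b,c], _ => simp [pvBlocks]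
    | [a,b,c,d], _ => simp [pvBlocks]
    | a :: b :: c :: d :: e :: rest, hl =>
        have hm : ((a :: b :: c :: d :: e :: rest).length + 4) / 5 = ((rest.length + 4) / 5) + 1 := by
          simp; omega
        rw [hm, List.range_succ_eq_map, List.map_cons, List.map_map, List.flatten_cons]
        have hdrop : ∀ k : Nat, (a :: b :: c :: d :: e :: rest).drop (5 * (k + 1)) = rest.drop (5 * k) := by
          intro k
          rw [show 5 * (k + 1) = 5 * k + 5 by ring]
          rw [show (5 * k + 5) = 5 * k + 5 from rfl]
          have : (a :: b :: c :: d :: e :: rest).drop (5 * k + 5) = ((a :: b :: c :: d :: e :: rest).drop 5).drop (5 * k) := by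
            rw [List.drop_drop]; ring_nf
          rw [this]
          rfl
        have hfun : ∀ k ∈ List.range ((rest.length + 4) / 5),
            ((fun k =>
              if (((a :: b :: c :: d :: e :: rest).drop (5 * k)).take 5).length = 5
              then ((a :: b :: c :: d :: e :: rest).drop (5 * k)).take 5 ++ [' ']
              else ((a :: b :: c :: d :: e :: rest).drop (5 * k)).take 5) ∘ (fun k => k + 1)) k
            = (fun k =>
              if ((rest.drop (5 * k)).take 5).length = 5 then (rest.drop (5 * k)).take 5 ++ [' ']
              else (rest.drop (5 * k)).take 5) k := by
          intro k _
          simp only [Function.comp, hdrop k]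
        rw [List.map_congr_left hfun, ih rest (by simp only [List.length_cons] at hl; omega), pvBlocks_cons5]
        norm_num

theorem alt_blocks (l : List Char) :
    (((PySem.List.pyRange 0 (l.length : Int) 5).map
        (fun i => PySem.List.slice l (some i) (some (i + 5)))).map
      (fun b => if b.length = 5 then b ++ [' '] else b)).flatten = pvBlocks l := by
  rw [pyRange_five, List.map_map, List.map_map]
  have hfun : ∀ k ∈ List.range ((l.length + 4) / 5),
      (((fun b => if b.length = 5 then b ++ [' '] else b) ∘
        (fun i => PySem.List.slice l (some i) (some (i + 5)))) ∘ (fun k : Nat => (5 * (k : Int)))) k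
      = (fun k =>
          if ((l.drop (5 * k)).take 5).length = 5 then (l.drop (5 * k)).take 5 ++ [' ']
          else (l.drop (5 * k)).take 5) k := by
    intro k _
    simp only [Function.comp, slice_chunk l k]
  rw [List.map_congr_left hfun]
  exact chunk_fuel l.length l (le_refl _)

-- ---- lengths: |pvBlocks l| = |l| + |l| / 5, so A's dash count equals B's ----

theorem pvBlocks_length_fuel (n : Nat) : ∀ (l : List Char), l.length ≤ n → (pvBlocks l).length = l.length + l.length / 5 := by
  induction n with
  | zero => intro l hl; rw [pvBlocks]; simp at hl; simp [hl]
  | succ n ih =>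
    intro l hl
    rw [pvBlocks]
    by_cases h : l.length < 5
    · simp [h]
    · rw [if_neg h]
      simp [ih (l.drop 5) (by simp; omega)]
      omega

theorem five_keyword_eq_alt (message : String) : five_keyword message = five_keyword_alt message := by
  simp only [five_keyword, five_keyword_alt]
  rw [foldA_filter, fold_blocks_fuel _ _ (le_refl _), alt_blocks]
  have hlen := pvBlocks_length_fuel _ ((PySem.Str.upper message).toList.filter (fun c => decide (c ∈ pvAlnum))) (le_refl _)
  simp only [List.nil_append, hlen]
  have h6 : ∀ x : Nat, 5 - (x + x / 5) % 6 = 5 - x % 5 := fun x => by omega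
  rw [h6]

-- ===== VERDICT (by name: the statement is the Claim_ definition above) =====
theorem five_keyword_spec : Claim_equal_five_keyword := by
  intro message _
  exact five_keyword_eq_alt message
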